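-- pv_equiv track=rewrite | github.com/francescapalazzotto/Portfolio_ITDC | Ex4_LZ_Family_BWT.py | odd_even_Fibonacci
-- ===== SOURCE A (Python) =====
-- def odd_even_Fibonacci(n: int):
--     '''
--     Input:
--         - The parameter n used is referred to the total number of the set that we want to compress
--     Output:
--         - list of first n odd Fibonacci numbers
--         - list of first n even Fibonacci numbers
--     '''
--     words_odd = ["a"]
--     words_even = ["b"]
--     fib_words = ["a", "b"]
--
--     for i in range(2, 2*n):
--         fib = fib_words[i-1] + fib_words[i-2]
--         fib_words.append(fib)
--         if i % 2 == 0: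
--             words_even.append(fib)
--         else:
--             words_odd.append(fib)
--
--     return words_odd, words_even
-- ===== SOURCE B (Python) =====
-- def odd_even_Fibonacci(n: int):
--     '''
--     Same values as A, computed with O(1) word state: instead of keeping the whole
--     fib_words list and branching on the index parity, each loop turn produces one even-indexed
--     and one odd-indexed Fibonacci word directly from the previous two words.
--     '''
--     words_odd = ["a"]
--     words_even = ["b"]
--     prev, cur = "a", "b"
--     for _ in range(1, n):
--         even_w = cur + prev
--         odd_w = even_w + cur
--         words_odd.append(odd_w)
--         words_even.append(even_w)
--         prev, cur = even_w, odd_w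
--     return words_odd, words_even
-- ===== Notes on version B (the rewrite author's own statement) =====
-- stated objective: alternative
-- what changed: B drops the fib_words history list and the parity branch: it keeps only the last two words and appends one even-indexed and one odd-indexed Fibonacci word per iteration of a halved loop.
import Mathlib
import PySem

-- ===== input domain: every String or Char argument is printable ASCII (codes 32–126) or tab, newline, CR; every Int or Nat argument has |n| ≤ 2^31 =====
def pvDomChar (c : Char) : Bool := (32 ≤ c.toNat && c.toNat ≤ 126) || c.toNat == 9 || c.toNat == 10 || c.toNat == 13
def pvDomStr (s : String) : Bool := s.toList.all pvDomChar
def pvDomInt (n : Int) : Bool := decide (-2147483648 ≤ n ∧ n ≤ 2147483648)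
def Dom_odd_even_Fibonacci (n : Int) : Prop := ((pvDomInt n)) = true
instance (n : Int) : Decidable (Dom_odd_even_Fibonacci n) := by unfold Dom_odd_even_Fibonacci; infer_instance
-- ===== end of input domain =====

-- B keeps only the last two Fibonacci words and emits one even- and one odd-indexed
-- word per turn of a halved loop, instead of A's full history list with an index-parity branch.

-- ===== PORT A =====
-- A's loop body over state (words_odd, words_even, fib_words); the indices i-1, i-2
-- are always in range in Python, so pyGetD's default "" is never used.
def stepA (st : List String × List String × List String) (i : Int) :
    List String × List String × List String :=
  let fib := (PySem.List.pyGetD st.2.2 (i-1) "") ++ (PySem.List.pyGetD st.2.2 (i-2) "")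
  if PySem.Int.mod i 2 == 0 then (st.1, st.2.1 ++ [fib], st.2.2 ++ [fib])
  else (st.1 ++ [fib], st.2.1, st.2.2 ++ [fib])

def odd_even_Fibonacci (n : Int) : List String × List String :=
  let st := (PySem.List.pyRange 2 (2*n) 1).foldl stepA (["a"], ["b"], ["a", "b"])
  (st.1, st.2.1)

-- ===== PORT B =====
-- B's loop body over state (words_odd, words_even, prev, cur).
def stepB (st : List String × List String × String × String) (_i : Int) :
    List String × List String × String × String :=
  let evenW := st.2.2.2 ++ st.2.2.1
  let oddW := evenW ++ st.2.2.2
  (st.1 ++ [oddW], st.2.1 ++ [evenW], evenW, oddW)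

def odd_even_Fibonacci_alt (n : Int) : List String × List String :=
  let st := (PySem.List.pyRange 1 n 1).foldl stepB (["a"], ["b"], "a", "b")
  (st.1, st.2.1)

-- ===== PRECONDITION & SPEC =====
def Spec_odd_even_Fibonacci (n : Int) (out : List String × List String) : Prop := out = odd_even_Fibonacci_alt n
instance (n : Int) (out : List String × List String) : Decidable (Spec_odd_even_Fibonacci n out) := by unfold Spec_odd_even_Fibonacci; infer_instance

-- ===== CLAIM (what is proved, stated in full; the proofs are below) =====
def Claim_equal_odd_even_Fibonacci : Prop := ∀ (n : Int), Dom_odd_even_Fibonacci n → Spec_odd_even_Fibonacci n (odd_even_Fibonacci n)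

-- ===== LEMMAS AND PROOFS =====

-- Invariant: after k B-steps (= 2k A-steps) the two output lists agree and A's
-- fib_words list ends with B's (prev, cur).
lemma main_inv (k : Nat) :
    ∃ ys : List String,
      (PySem.List.pyRange 2 (2 + 2 * (k : Int)) 1).foldl stepA (["a"], ["b"], ["a", "b"])
        = (((PySem.List.pyRange 1 (1 + (k : Int)) 1).foldl stepB (["a"], ["b"], "a", "b")).1,
           ((PySem.List.pyRange 1 (1 + (k : Int)) 1).foldl stepB (["a"], ["b"], "a", "b")).2.1,
           ys ++ [((PySem.List.pyRange 1 (1 + (k : Int)) 1).foldl stepB (["a"], ["b"], "a", "b")).2.2.1,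
                  ((PySem.List.pyRange 1 (1 + (k : Int)) 1).foldl stepB (["a"], ["b"], "a", "b")).2.2.2])
      ∧ ys.length = 2 * k := by
  induction k with
  | zero =>
    refine ⟨[], ?_, rfl⟩
    norm_num [PySem.List.pyRange_one_eq_nil]
  | succ k ih =>
    obtain ⟨ys, heq, hlen⟩ := ih
    have hA : PySem.List.pyRange 2 (2 + 2 * ((k + 1 : Nat) : Int)) 1
        = PySem.List.pyRange 2 (2 + 2 * (k : Int)) 1 ++ [2 + 2*(k:Int), 3 + 2*(k:Int)] := by
      have e1 : (2 + 2 * ((k + 1 : Nat) : Int)) = (2 + 2*(k:Int) + 1) + 1 := by push_cast; ring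
      rw [e1, PySem.List.pyRange_one_succ_right (by omega),
          PySem.List.pyRange_one_succ_right (by omega)]
      simp
      omega
    have hB : PySem.List.pyRange 1 (1 + ((k + 1 : Nat) : Int)) 1
        = PySem.List.pyRange 1 (1 + (k : Int)) 1 ++ [1 + (k:Int)] := by
      have e1 : (1 + ((k + 1 : Nat) : Int)) = (1 + (k:Int)) + 1 := by push_cast; ring
      rw [e1, PySem.List.pyRange_one_succ_right (by omega)]
    set B := (PySem.List.pyRange 1 (1 + (k : Int)) 1).foldl stepB (["a"], ["b"], "a", "b") with hBdef
    obtain ⟨wo, we, p, c⟩ := B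
    simp only at heq
    have g1 : PySem.List.pyGetD (ys ++ [p, c]) (2 + 2*(k:Int) - 1) "" = c := by
      have h1 : (2 + 2*(k:Int) - 1) = ((ys.length + 1 : Nat) : Int) := by push_cast; omega
      rw [h1, PySem.List.pyGetD_natCast]
      simp [List.getD]
    have g2 : PySem.List.pyGetD (ys ++ [p, c]) (2 + 2*(k:Int) - 2) "" = p := by
      have h1 : (2 + 2*(k:Int) - 2) = ((ys.length : Nat) : Int) := by omega
      rw [h1, PySem.List.pyGetD_natCast]
      simp [List.getD]
    have g3 : PySem.List.pyGetD ((ys ++ [p, c]) ++ [c ++ p]) (3 + 2*(k:Int) - 1) "" = c ++ p := by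
      have h1 : (3 + 2*(k:Int) - 1) = (((ys ++ [p, c]).length : Nat) : Int) := by
        simp; omega
      rw [h1, PySem.List.pyGetD_natCast]
      simp [List.getD]
    have g4 : PySem.List.pyGetD ((ys ++ [p, c]) ++ [c ++ p]) (3 + 2*(k:Int) - 2) "" = c := by
      have h1 : (3 + 2*(k:Int) - 2) = ((ys.length + 1 : Nat) : Int) := by push_cast; omega
      rw [h1, PySem.List.pyGetD_natCast]
      simp [List.getD]
    have m1 : (PySem.Int.mod (2 + 2*(k:Int)) 2 == 0) = true := by
      simp [PySem.Int.mod]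
    have s1 : stepA (wo, we, ys ++ [p, c]) (2 + 2*(k:Int))
        = (wo, we ++ [c ++ p], (ys ++ [p, c]) ++ [c ++ p]) := by
      simp only [stepA]
      rw [g1, g2, if_pos m1]
    have s2 : stepA (wo, we ++ [c ++ p], (ys ++ [p, c]) ++ [c ++ p]) (3 + 2*(k:Int))
        = (wo ++ [(c ++ p) ++ c], we ++ [c ++ p], ((ys ++ [p, c]) ++ [c ++ p]) ++ [(c ++ p) ++ c]) := by
      simp only [stepA]
      rw [g3, g4, if_neg (by simp [PySem.Int.mod])]
    refine ⟨ys ++ [p, c], ?_, by simp [hlen]; omega⟩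
    rw [hA, hB]
    rw [List.foldl_append, List.foldl_append]
    rw [heq]
    rw [← hBdef]
    simp only [List.foldl_cons, List.foldl_nil]
    rw [s1, s2]
    simp only [stepB]
    simp

-- ===== VERDICT (by name: the statement is the Claim_ definition above) =====
theorem odd_even_Fibonacci_spec : Claim_equal_odd_even_Fibonacci := by
  intro n _
  unfold Spec_odd_even_Fibonacci odd_even_Fibonacci odd_even_Fibonacci_alt
  by_cases hn : n ≤ 1
  · rw [PySem.List.pyRange_one_eq_nil (by omega), PySem.List.pyRange_one_eq_nil (by omega)]
    rfl
  · obtain ⟨ys, heq, -⟩ := main_inv (n-1).toNat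
    have h2 : (2 : Int) + 2 * ((n-1).toNat : Int) = 2*n := by omega
    have h1 : (1 : Int) + ((n-1).toNat : Int) = n := by omega
    rw [h2, h1] at heq
    simp only [heq]
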